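-- pv_equiv track=rewrite | github.com/gene-git/dns_tools | src/dns_tools/lib/dns_serial.py | update_serial_to_new
-- ===== SOURCE A (Python) =====
-- def update_serial_to_new(zone_rows, serial, new_serial):
--     """
--     Given list of zonefile rows
--      - Find and increment serial number
--      - return updated rows.
--        Ensure we update the actual serial so
--         - ignore comment rows or anything after a comment
--         - trigger on SOA - then replace once
--     """
--     soa_found = False
--     serial_updated = False
--     zone_updated = []
--     for row in zone_rows:
--         if serial_updated or row.startswith(';') :
--             zone_updated.append(row)
--             continue
--
--         row_split = row.split(';', 1)
--         text = row_split[0]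
--
--         if not soa_found:
--             if 'soa' in text or 'SOA' in text:
--                 soa_found = True
--
--         if soa_found:
--             if serial in text:
--                 serial_updated = True
--                 new_text = row.replace(serial, new_serial)
--                 zone_updated.append(new_text)
--             else:
--                 zone_updated.append(row)
--         else:
--             zone_updated.append(row)
--
--     return zone_updated
-- ===== SOURCE B (Python) =====
-- def update_serial_to_new(zone_rows, serial, new_serial):
--     """Two-phase: locate the index of the row to patch, then rebuild by slicing."""
--     idx = None
--     soa_found = False
--     for i, row in enumerate(zone_rows):
--         if row.startswith(';'):
--             continue
--         text = row.split(';', 1)[0]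
--         soa_found = soa_found or 'soa' in text or 'SOA' in text
--         if soa_found and serial in text:
--             idx = i
--             break
--     if idx is None:
--         return list(zone_rows)
--     return zone_rows[:idx] + [zone_rows[idx].replace(serial, new_serial)] + zone_rows[idx + 1:]
-- ===== Notes on version B (the rewrite author's own statement) =====
-- stated objective: alternative
-- what changed: B splits the work into a search phase that only finds the index of the row to patch (with an early break) and a slicing phase that rebuilds the list, instead of A's single pass that copies every row through a stateful accumulator.
import Mathlib
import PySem

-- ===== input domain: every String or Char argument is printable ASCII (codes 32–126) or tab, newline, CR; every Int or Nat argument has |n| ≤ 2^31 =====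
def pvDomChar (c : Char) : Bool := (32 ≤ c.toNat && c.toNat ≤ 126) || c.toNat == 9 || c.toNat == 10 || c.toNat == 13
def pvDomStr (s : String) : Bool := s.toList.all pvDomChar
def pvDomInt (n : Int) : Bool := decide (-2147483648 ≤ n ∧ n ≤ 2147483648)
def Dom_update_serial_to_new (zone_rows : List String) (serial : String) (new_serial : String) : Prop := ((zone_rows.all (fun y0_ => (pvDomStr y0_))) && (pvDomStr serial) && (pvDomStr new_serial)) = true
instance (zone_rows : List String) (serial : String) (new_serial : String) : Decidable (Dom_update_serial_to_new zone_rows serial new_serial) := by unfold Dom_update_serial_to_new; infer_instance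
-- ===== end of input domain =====

-- B replaces A's single stateful copy-everything pass by a search phase (index of the
-- row to patch, stopping there) plus a slicing phase rebuilding the list; same values.

-- ===== PORT A =====
-- text = row.split(';', 1)[0]  (sep ";" nonempty, so splitMax? is some; a split always has a head)
def pvRowText (row : String) : String :=
  (((PySem.Str.splitMax? row ";" 1).getD []).headD "")

-- the for-loop of A: state (soa_found, serial_updated), appending to the output in order
def pvLoopA (serial new_serial : String) : List String → Bool → Bool → List String
  | [], _, _ => []
  | row :: rest, soa_found, serial_updated =>
    if serial_updated || PySem.Str.startswith row ";" then
      row :: pvLoopA serial new_serial rest soa_found serial_updated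
    else
      let text := pvRowText row
      let soa_found' :=
        if !soa_found then (PySem.Str.isIn "soa" text || PySem.Str.isIn "SOA" text)
        else soa_found
      if soa_found' then
        if PySem.Str.isIn serial text then
          PySem.Str.replace row serial new_serial :: pvLoopA serial new_serial rest soa_found' true
        else
          row :: pvLoopA serial new_serial rest soa_found' serial_updated
      else
        row :: pvLoopA serial new_serial rest soa_found' serial_updated

def update_serial_to_new (zone_rows : List String) (serial : String) (new_serial : String) : List String :=
  pvLoopA serial new_serial zone_rows false false

-- ===== PORT B =====
-- phase 1 of Source B: index of the first non-comment row whose pre-';' text matches, SOA flag threaded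
def pvFindIdx (serial : String) : List String → Bool → Option Nat
  | [], _ => none
  | row :: rest, soa_found =>
    if PySem.Str.startswith row ";" then
      (pvFindIdx serial rest soa_found).map (· + 1)
    else
      let text := pvRowText row
      let soa_found' := soa_found || PySem.Str.isIn "soa" text || PySem.Str.isIn "SOA" text
      if soa_found' && PySem.Str.isIn serial text then some 0
      else (pvFindIdx serial rest soa_found').map (· + 1)

def update_serial_to_new_alt (zone_rows : List String) (serial : String) (new_serial : String) : List String :=
  match pvFindIdx serial zone_rows false with
  | none => zone_rows
  | some i =>
      zone_rows.take i ++ [PySem.Str.replace (zone_rows.getD i "") serial new_serial]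
        ++ zone_rows.drop (i + 1)

-- ===== PRECONDITION & SPEC =====
def Spec_update_serial_to_new (zone_rows : List String) (serial : String) (new_serial : String) (out : List String) : Prop := out = update_serial_to_new_alt zone_rows serial new_serial
instance (zone_rows : List String) (serial : String) (new_serial : String) (out : List String) : Decidable (Spec_update_serial_to_new zone_rows serial new_serial out) := by unfold Spec_update_serial_to_new; infer_instance

-- ===== CLAIM (what is proved, stated in full; the proofs are below) =====
def Claim_equal_update_serial_to_new : Prop := ∀ (zone_rows : List String) (serial : String) (new_serial : String), Dom_update_serial_to_new zone_rows serial new_serial → Spec_update_serial_to_new zone_rows serial new_serial (update_serial_to_new zone_rows serial new_serial)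

-- ===== LEMMAS AND PROOFS =====

-- once serial_updated is true, A copies the rest unchanged
theorem pvLoopA_done (serial new_serial : String) (rows : List String) (soa : Bool) :
    pvLoopA serial new_serial rows soa true = rows := by
  induction rows with
  | nil => rfl
  | cons row rest ih => simp [pvLoopA, ih]

-- main invariant: A's loop agrees with B's find-then-slice for any threaded soa flag
theorem pvLoopA_eq_find (serial new_serial : String) (rows : List String) (soa : Bool) :
    pvLoopA serial new_serial rows soa false =
      match pvFindIdx serial rows soa with
      | none => rows
      | some i =>
          rows.take i ++ [PySem.Str.replace (rows.getD i "") serial new_serial]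
            ++ rows.drop (i + 1) := by
  induction rows generalizing soa with
  | nil => rfl
  | cons row rest ih =>
    by_cases hc : PySem.Str.startswith row ";" = true
    · simp only [pvLoopA, pvFindIdx, hc, Bool.or_true, if_true]
      rw [ih soa]
      cases h : pvFindIdx serial rest soa with
      | none => simp
      | some i => simp [List.take_succ_cons, List.drop_succ_cons]
    · have hc' : PySem.Str.startswith row ";" = false := by simpa using hc
      simp only [pvLoopA, pvFindIdx, hc', Bool.or_false]
      have hsoa : (if !soa then (PySem.Str.isIn "soa" (pvRowText row) || PySem.Str.isIn "SOA" (pvRowText row)) else soa)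
          = (soa || PySem.Str.isIn "soa" (pvRowText row) || PySem.Str.isIn "SOA" (pvRowText row)) := by
        cases soa <;> simp
      rw [hsoa]
      generalize (soa || PySem.Str.isIn "soa" (pvRowText row) || PySem.Str.isIn "SOA" (pvRowText row)) = soa'
      cases soa' with
      | false =>
        simp only [Bool.false_and, if_false, Bool.false_eq_true]
        rw [ih false]
        cases h : pvFindIdx serial rest false with
        | none => simp
        | some i => simp [List.take_succ_cons, List.drop_succ_cons]
      | true =>
        simp only [Bool.true_and, if_true]
        by_cases hin : PySem.Str.isIn serial (pvRowText row) = true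
        · have hin2 : PySem.Chars.isIn serial.toList (pvRowText row).toList = true := by
            simpa using hin
          simp [hin2, pvLoopA_done]
        · have hin' : PySem.Str.isIn serial (pvRowText row) = false := by simpa using hin
          simp only [hin', if_false, Bool.false_eq_true]
          rw [ih true]
          cases h : pvFindIdx serial rest true with
          | none => simp
          | some i => simp [List.take_succ_cons, List.drop_succ_cons]

-- ===== VERDICT (by name: the statement is the Claim_ definition above) =====
theorem update_serial_to_new_spec : Claim_equal_update_serial_to_new := by
  intro zone_rows serial new_serial _
  unfold Spec_update_serial_to_new update_serial_to_new update_serial_to_new_alt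
  rw [pvLoopA_eq_find]
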